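-- pv_equiv track=rewrite | github.com/Cloudeasy-SudhakarRaju/AZ-LZ-Agent | backend/langgraph_workflow.py | _categorize_spoke_services
-- ===== SOURCE A (Python) =====
-- from typing import Dict, List, Any, Optional, TypedDict
--
-- def _categorize_spoke_services(spoke_services: List[str], environment: str) -> Dict[str, List[str]]:
--     """Categorize services by tier within spoke"""
--     categories = {
--         "web_tier": [],
--         "application_tier": [],
--         "data_tier": [],
--         "integration_tier": []
--     }
--
--     for service in spoke_services:
--         if service in ['app_services', 'web_apps']:
--             categories["web_tier"].append(service)
--         elif service in ['virtual_machines', 'function_apps', 'aks']: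
--             categories["application_tier"].append(service)
--         elif service in ['sql_database', 'cosmos_db', 'mysql', 'postgresql']:
--             categories["data_tier"].append(service)
--         elif service in ['api_management', 'service_bus', 'event_hubs']:
--             categories["integration_tier"].append(service)
--
--     return categories
-- ===== SOURCE B (Python) =====
-- _TIERS = [
--     ("web_tier", ("app_services", "web_apps")),
--     ("application_tier", ("virtual_machines", "function_apps", "aks")),
--     ("data_tier", ("sql_database", "cosmos_db", "mysql", "postgresql")),
--     ("integration_tier", ("api_management", "service_bus", "event_hubs")),
-- ]
--
-- def _categorize_spoke_services(spoke_services, environment):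
--     """Categorize services by tier: one filtering pass per tier over a tier table."""
--     return {tier: [s for s in spoke_services if s in members] for tier, members in _TIERS}
-- ===== Notes on version B (the rewrite author's own statement) =====
-- stated objective: simpler
-- what changed: Replaces the four-way elif chain mutating a dict inside one loop by a table of (tier, members) pairs and builds each tier's list with a single filter comprehension per tier.
import Mathlib
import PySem

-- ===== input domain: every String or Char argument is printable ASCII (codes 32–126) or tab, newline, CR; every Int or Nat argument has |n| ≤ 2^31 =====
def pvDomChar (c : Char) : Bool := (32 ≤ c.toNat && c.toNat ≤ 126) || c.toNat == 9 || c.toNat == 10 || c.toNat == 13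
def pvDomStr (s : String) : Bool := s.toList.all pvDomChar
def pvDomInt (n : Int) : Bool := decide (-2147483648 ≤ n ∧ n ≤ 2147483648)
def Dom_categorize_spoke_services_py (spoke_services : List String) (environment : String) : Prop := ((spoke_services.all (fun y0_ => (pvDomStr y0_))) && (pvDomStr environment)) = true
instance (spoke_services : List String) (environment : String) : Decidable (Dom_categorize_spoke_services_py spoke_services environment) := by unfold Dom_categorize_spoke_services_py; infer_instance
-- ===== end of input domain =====

-- B replaces A's four-branch elif chain mutating one dict with a (tier, members) table
-- and one filter per tier; objective: simpler. Equivalence of return values is proved.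

-- ===== PORT A =====
-- one loop over spoke_services; each branch appends to the list stored under the tier key
def categorize_spoke_services_py (spoke_services : List String) (environment : String) : List (String × List String) :=
  let categories : PySem.Dict String (List String) :=
    PySem.Dict.mk [("web_tier", []), ("application_tier", []), ("data_tier", []), ("integration_tier", [])]
  let categories := spoke_services.foldl (fun d service =>
    if ["app_services", "web_apps"].contains service then
      d.modify "web_tier" [] (· ++ [service])
    else if ["virtual_machines", "function_apps", "aks"].contains service then
      d.modify "application_tier" [] (· ++ [service])
    else if ["sql_database", "cosmos_db", "mysql", "postgresql"].contains service then
      d.modify "data_tier" [] (· ++ [service])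
    else if ["api_management", "service_bus", "event_hubs"].contains service then
      d.modify "integration_tier" [] (· ++ [service])
    else d) categories
  categories.items

-- ===== PORT B =====
def pvTiers : List (String × List String) :=
  [("web_tier", ["app_services", "web_apps"]),
   ("application_tier", ["virtual_machines", "function_apps", "aks"]),
   ("data_tier", ["sql_database", "cosmos_db", "mysql", "postgresql"]),
   ("integration_tier", ["api_management", "service_bus", "event_hubs"])]

def categorize_spoke_services_py_alt (spoke_services : List String) (environment : String) : List (String × List String) :=
  pvTiers.map (fun tm => (tm.1, spoke_services.filter (fun s => tm.2.contains s)))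

-- ===== PRECONDITION & SPEC =====
def Spec_categorize_spoke_services_py (spoke_services : List String) (environment : String) (out : List (String × List String)) : Prop := out = categorize_spoke_services_py_alt spoke_services environment
instance (spoke_services : List String) (environment : String) (out : List (String × List String)) : Decidable (Spec_categorize_spoke_services_py spoke_services environment out) := by unfold Spec_categorize_spoke_services_py; infer_instance

-- ===== CLAIM (what is proved, stated in full; the proofs are below) =====
def Claim_equal_categorize_spoke_services_py : Prop := ∀ (spoke_services : List String) (environment : String), Dom_categorize_spoke_services_py spoke_services environment → Spec_categorize_spoke_services_py spoke_services environment (categorize_spoke_services_py spoke_services environment)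

-- ===== LEMMAS AND PROOFS =====


-- reduction of Dict.modify on A's literal 4-key dict, one lemma per tier key
lemma pvModify_web (w a d i : List String) (x : String) :
    (PySem.Dict.mk [("web_tier", w), ("application_tier", a), ("data_tier", d), ("integration_tier", i)]).modify "web_tier" ([] : List String) (· ++ [x])
  = PySem.Dict.mk [("web_tier", w ++ [x]), ("application_tier", a), ("data_tier", d), ("integration_tier", i)] := by
  simp [PySem.Dict.modify, PySem.Dict.getD, PySem.Dict.get?, PySem.Dict.insert]

lemma pvModify_app (w a d i : List String) (x : String) :
    (PySem.Dict.mk [("web_tier", w), ("application_tier", a), ("data_tier", d), ("integration_tier", i)]).modify "application_tier" ([] : List String) (· ++ [x])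
  = PySem.Dict.mk [("web_tier", w), ("application_tier", a ++ [x]), ("data_tier", d), ("integration_tier", i)] := by
  simp [PySem.Dict.modify, PySem.Dict.getD, PySem.Dict.get?, PySem.Dict.insert]

lemma pvModify_data (w a d i : List String) (x : String) :
    (PySem.Dict.mk [("web_tier", w), ("application_tier", a), ("data_tier", d), ("integration_tier", i)]).modify "data_tier" ([] : List String) (· ++ [x])
  = PySem.Dict.mk [("web_tier", w), ("application_tier", a), ("data_tier", d ++ [x]), ("integration_tier", i)] := by
  simp [PySem.Dict.modify, PySem.Dict.getD, PySem.Dict.get?, PySem.Dict.insert]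

lemma pvModify_int (w a d i : List String) (x : String) :
    (PySem.Dict.mk [("web_tier", w), ("application_tier", a), ("data_tier", d), ("integration_tier", i)]).modify "integration_tier" ([] : List String) (· ++ [x])
  = PySem.Dict.mk [("web_tier", w), ("application_tier", a), ("data_tier", d), ("integration_tier", i ++ [x])] := by
  simp [PySem.Dict.modify, PySem.Dict.getD, PySem.Dict.get?, PySem.Dict.insert]

-- loop invariant: A's fold over a 4-key literal dict accumulates, per key, the filter B computes
lemma categorize_foldl_invariant (ss : List String) (w a d i : List String) :
    (ss.foldl (fun d service =>
      if ["app_services", "web_apps"].contains service then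
        d.modify "web_tier" [] (· ++ [service])
      else if ["virtual_machines", "function_apps", "aks"].contains service then
        d.modify "application_tier" [] (· ++ [service])
      else if ["sql_database", "cosmos_db", "mysql", "postgresql"].contains service then
        d.modify "data_tier" [] (· ++ [service])
      else if ["api_management", "service_bus", "event_hubs"].contains service then
        d.modify "integration_tier" [] (· ++ [service])
      else d)
      (PySem.Dict.mk [("web_tier", w), ("application_tier", a), ("data_tier", d), ("integration_tier", i)])).items
    = [("web_tier", w ++ ss.filter (fun s => ["app_services", "web_apps"].contains s)),
       ("application_tier", a ++ ss.filter (fun s => ["virtual_machines", "function_apps", "aks"].contains s)),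
       ("data_tier", d ++ ss.filter (fun s => ["sql_database", "cosmos_db", "mysql", "postgresql"].contains s)),
       ("integration_tier", i ++ ss.filter (fun s => ["api_management", "service_bus", "event_hubs"].contains s))] := by
  induction ss generalizing w a d i with
  | nil => simp
  | cons x xs ih =>
    by_cases h1 : ["app_services", "web_apps"].contains x = true
    · simp only [List.contains_eq_mem, List.mem_cons, List.not_mem_nil, or_false,
        decide_eq_true_eq] at h1
      rcases h1 with rfl | rfl <;>
        rw [List.foldl_cons, if_pos (by decide), pvModify_web, ih] <;> simp
    · by_cases h2 : ["virtual_machines", "function_apps", "aks"].contains x = true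
      · simp only [List.contains_eq_mem, List.mem_cons, List.not_mem_nil, or_false,
          decide_eq_true_eq] at h2
        rcases h2 with rfl | rfl | rfl <;>
          rw [List.foldl_cons, if_neg (by decide), if_pos (by decide), pvModify_app, ih] <;> simp
      · by_cases h3 : ["sql_database", "cosmos_db", "mysql", "postgresql"].contains x = true
        · simp only [List.contains_eq_mem, List.mem_cons, List.not_mem_nil, or_false,
            decide_eq_true_eq] at h3
          rcases h3 with rfl | rfl | rfl | rfl <;>
            rw [List.foldl_cons, if_neg (by decide), if_neg (by decide), if_pos (by decide),
              pvModify_data, ih] <;> simp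
        · by_cases h4 : ["api_management", "service_bus", "event_hubs"].contains x = true
          · simp only [List.contains_eq_mem, List.mem_cons, List.not_mem_nil, or_false,
              decide_eq_true_eq] at h4
            rcases h4 with rfl | rfl | rfl <;>
              rw [List.foldl_cons, if_neg (by decide), if_neg (by decide), if_neg (by decide),
                if_pos (by decide), pvModify_int, ih] <;> simp
          · rw [List.foldl_cons, if_neg h1, if_neg h2, if_neg h3, if_neg h4, ih]
            simp_all

-- ===== VERDICT (by name: the statement is the Claim_ definition above) =====
theorem categorize_spoke_services_py_spec : Claim_equal_categorize_spoke_services_py := by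
  intro ss env _
  unfold Spec_categorize_spoke_services_py categorize_spoke_services_py categorize_spoke_services_py_alt pvTiers
  simp only [List.map]
  have := categorize_foldl_invariant ss [] [] [] []
  simpa using this
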